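-- pv_equiv track=rewrite | github.com/pavelsimushin/BetEduBot | db.py | get_stud_list
-- ===== SOURCE A (Python) =====
-- def get_stud_list(html):
--     res=[]
--     cur=""
--     for i in html:
--         if i==';':
--             if cur:
--                 res.append(cur[1:])
--                 cur=""
--             else:
--                 cur+=i
--         else:
--             if cur:
--                 cur+=i
--     return res
-- ===== SOURCE B (Python) =====
-- def get_stud_list(html):
--     fields = html.split(';')
--     return [fields[i] for i in range(1, len(fields) - 1, 2)]
-- ===== Notes on version B (the rewrite author's own statement) =====
-- stated objective: simpler
-- what changed: B replaces A's stateful character-by-character scan (accumulating a current field and flushing it at each closing semicolon) with one str.split on the semicolon separator followed by a strided selection of the odd-indexed fields, excluding the unterminated last field.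
import Mathlib
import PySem

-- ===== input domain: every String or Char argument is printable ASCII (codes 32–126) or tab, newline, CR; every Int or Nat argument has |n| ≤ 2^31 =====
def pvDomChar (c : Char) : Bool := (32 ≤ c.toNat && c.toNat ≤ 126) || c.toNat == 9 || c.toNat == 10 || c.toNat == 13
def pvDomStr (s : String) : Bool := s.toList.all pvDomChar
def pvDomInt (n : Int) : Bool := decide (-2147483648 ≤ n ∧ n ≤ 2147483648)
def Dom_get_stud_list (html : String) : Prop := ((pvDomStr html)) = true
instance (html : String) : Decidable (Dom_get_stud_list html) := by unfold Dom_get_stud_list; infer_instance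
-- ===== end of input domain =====

-- B replaces A's stateful character-by-character scan with a split on the semicolon separator and a
-- strided selection of the odd-indexed, semicolon-closed fields (objective: simpler).

-- ===== PORT A =====
-- loop body of A's 'for i in html' (res, cur as the fold state; cur is the Python string as List Char)
def pvStepA (st : List String × List Char) (i : Char) : List String × List Char :=
  if i = ';' then
    if st.2 ≠ [] then (st.1 ++ [String.ofList (PySem.List.slice st.2 (some 1) none)], [])
    else (st.1, st.2 ++ [i])
  else
    if st.2 ≠ [] then (st.1, st.2 ++ [i]) else st

def get_stud_list (html : String) : List String :=
  (html.toList.foldl pvStepA ([], [])).1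

-- ===== PORT B =====
def get_stud_list_alt (html : String) : List String :=
  let fields := (PySem.Str.split? html ";").getD []
  (PySem.List.pyRange 1 ((fields.length : Int) - 1) 2).map
    (fun i => PySem.List.pyGetD fields i "")

-- ===== PRECONDITION & SPEC =====
def Spec_get_stud_list (html : String) (out : List String) : Prop := out = get_stud_list_alt html
instance (html : String) (out : List String) : Decidable (Spec_get_stud_list html out) := by unfold Spec_get_stud_list; infer_instance

-- ===== CLAIM (what is proved, stated in full; the proofs are below) =====
def Claim_equal_get_stud_list : Prop := ∀ (html : String), Dom_get_stud_list html → Spec_get_stud_list html (get_stud_list html)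

-- ===== LEMMAS AND PROOFS =====

-- split on a single ';' as a structural recursion
def pvSplitSemi : List Char → List (List Char)
  | [] => [[]]
  | c :: t => if c = ';' then [] :: pvSplitSemi t else (pvSplitSemi t).modifyHead (c :: ·)

-- pick the fields a closing ';' terminates: flag true = currently at an even index
def pvPick : Bool → List String → List String
  | _, [] => []
  | true, _ :: t => pvPick false t
  | false, x :: t => if t = [] then [] else x :: pvPick true t

theorem pvSplitSemi_ne_nil (l : List Char) : pvSplitSemi l ≠ [] := by
  induction l with
  | nil => simp [pvSplitSemi]
  | cons c t ih =>
    simp only [pvSplitSemi]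
    split_ifs
    · simp
    · intro h; exact ih (by simpa using congrArg List.length h)

theorem pvGo_eq (fuel : Nat) (l cur : List Char) (acc : List (List Char)) (h : l.length ≤ fuel) :
    PySem.Chars.splitOn.go [';'] fuel l cur acc
      = acc.reverse ++ (pvSplitSemi l).modifyHead (cur.reverse ++ ·) := by
  induction fuel generalizing l cur acc with
  | zero =>
    have hl : l = [] := List.length_eq_zero_iff.mp (Nat.le_zero.mp h)
    subst hl
    simp [PySem.Chars.splitOn.go, pvSplitSemi]
  | succ fuel ih =>
    cases l with
    | nil => simp [PySem.Chars.splitOn.go, pvSplitSemi]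
    | cons c rest =>
      have hrest : rest.length ≤ fuel := by simp at h; omega
      by_cases hc : c = ';'
      · subst hc
        have hgo : PySem.Chars.splitOn.go [';'] (fuel+1) (';'::rest) cur acc
            = PySem.Chars.splitOn.go [';'] fuel rest [] (cur.reverse :: acc) := by
          simp [PySem.Chars.splitOn.go, List.isPrefixOf]
        rw [hgo, ih rest [] (cur.reverse :: acc) hrest]
        simp only [pvSplitSemi]
        cases hs : pvSplitSemi rest with
        | nil => exact absurd hs (pvSplitSemi_ne_nil rest)
        | cons a b => simp
      · have hgo : PySem.Chars.splitOn.go [';'] (fuel+1) (c::rest) cur acc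
            = PySem.Chars.splitOn.go [';'] fuel rest (c :: cur) acc := by
          simp [PySem.Chars.splitOn.go, List.isPrefixOf]
          intro hh; exact absurd hh.symm hc
        rw [hgo, ih rest (c :: cur) acc hrest]
        simp only [pvSplitSemi, if_neg hc, List.modifyHead_modifyHead]
        congr 1
        cases hs : pvSplitSemi rest with
        | nil => exact absurd hs (pvSplitSemi_ne_nil rest)
        | cons a b => simp [Function.comp]

theorem pvSplitOn_semi (l : List Char) : PySem.Chars.splitOn l [';'] = pvSplitSemi l := by
  have h := pvGo_eq (l.length + 1) l [] [] (Nat.le_succ _)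
  cases hs : pvSplitSemi l with
  | nil => exact absurd hs (pvSplitSemi_ne_nil l)
  | cons a b => simpa [PySem.Chars.splitOn, hs] using h

-- the strided selection over an index range IS pvPick
theorem pvStride_eq (fs : List String) :
    ((List.range ((fs.length - 1) / 2)).map (fun k => fs.getD (2 * k + 1) "") = pvPick true fs)
    ∧ ((List.range (fs.length / 2)).map (fun k => fs.getD (2 * k) "") = pvPick false fs) := by
  induction fs with
  | nil => simp [pvPick]
  | cons x t ih =>
    constructor
    · have hl : (x :: t).length - 1 = t.length := by simp
      rw [hl]
      calc (List.range (t.length / 2)).map (fun k => (x :: t).getD (2 * k + 1) "")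
          = (List.range (t.length / 2)).map (fun k => t.getD (2 * k) "") := by
            apply List.map_congr_left; intro k _; simp
        _ = pvPick false t := ih.2
        _ = pvPick true (x :: t) := by simp [pvPick]
    · cases t with
      | nil => simp [pvPick]
      | cons y u =>
        have hcount : (x :: y :: u).length / 2 = ((y :: u).length - 1) / 2 + 1 := by
          simp; omega
        rw [hcount, List.range_succ_eq_map]
        simp only [List.map_cons, List.map_map]
        have h1 : (x :: y :: u).getD (2 * 0) "" = x := by simp
        rw [h1]
        have h2 : ((List.range (((y :: u).length - 1) / 2)).map ((fun k => (x :: y :: u).getD (2 * k) "") ∘ Nat.succ))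
            = (List.range (((y :: u).length - 1) / 2)).map (fun k => (y :: u).getD (2 * k + 1) "") := by
          apply List.map_congr_left; intro k _
          have h3 : 2 * (k + 1) = 2 * k + 1 + 1 := by ring
          simp [Function.comp, Nat.succ_eq_add_one, h3]
        rw [h2, ih.1]
        simp [pvPick]

-- A's fold, in even mode (cur = []) and in odd mode (cur = ';' :: body)
theorem pvFoldA_eq (l : List Char) :
    (∀ res : List String,
      (l.foldl pvStepA (res, ([] : List Char))).1
        = res ++ pvPick true ((pvSplitSemi l).map String.ofList))
    ∧ (∀ (res : List String) (body : List Char),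
      (l.foldl pvStepA (res, ';' :: body)).1
        = res ++ pvPick false (((pvSplitSemi l).modifyHead (body ++ ·)).map String.ofList)) := by
  induction l with
  | nil => exact ⟨fun res => by simp [pvSplitSemi, pvPick],
            fun res body => by simp [pvSplitSemi, pvPick]⟩
  | cons c t ih =>
    constructor
    · intro res
      by_cases hc : c = ';'
      · subst hc
        have hstep : pvStepA (res, []) ';' = (res, [';']) := by simp [pvStepA]
        rw [List.foldl_cons, hstep, ih.2 res []]
        simp only [pvSplitSemi]
        cases hs : pvSplitSemi t with
        | nil => exact absurd hs (pvSplitSemi_ne_nil t)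
        | cons a b => simp [pvPick]
      · have hstep : pvStepA (res, []) c = (res, []) := by simp [pvStepA, hc]
        rw [List.foldl_cons, hstep, ih.1 res]
        simp only [pvSplitSemi, if_neg hc]
        cases hs : pvSplitSemi t with
        | nil => exact absurd hs (pvSplitSemi_ne_nil t)
        | cons a b => simp [pvPick]
    · intro res body
      by_cases hc : c = ';'
      · subst hc
        have hslice : PySem.List.slice (';' :: body) (some 1) none = body := by
          rw [PySem.List.slice_from _ (by norm_num : (0:Int) ≤ 1)]
          simp
        have hstep : pvStepA (res, ';' :: body) ';'
            = (res ++ [String.ofList body], []) := by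
          simp [pvStepA, hslice]
        rw [List.foldl_cons, hstep, ih.1 (res ++ [String.ofList body])]
        simp only [pvSplitSemi]
        cases hs : pvSplitSemi t with
        | nil => exact absurd hs (pvSplitSemi_ne_nil t)
        | cons a b => simp [pvPick]
      · have hstep : pvStepA (res, ';' :: body) c = (res, ';' :: (body ++ [c])) := by
          simp [pvStepA, hc]
        rw [List.foldl_cons, hstep, ih.2 res (body ++ [c])]
        simp only [pvSplitSemi, if_neg hc, List.modifyHead_modifyHead]
        congr 2
        cases hs : pvSplitSemi t with
        | nil => exact absurd hs (pvSplitSemi_ne_nil t)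
        | cons a b => simp [Function.comp]

theorem pvA_eq (html : String) :
    get_stud_list html = pvPick true ((pvSplitSemi html.toList).map String.ofList) := by
  simpa [get_stud_list] using (pvFoldA_eq html.toList).1 []

theorem pvB_aux (fs : List String) (hne : fs ≠ []) :
    (PySem.List.pyRange 1 ((fs.length : Int) - 1) 2).map (fun i => PySem.List.pyGetD fs i "")
      = pvPick true fs := by
  have hlen : 1 ≤ fs.length := List.length_pos_iff.mpr hne
  have hn : (if (1:Int) < (fs.length : Int) - 1
      then (((fs.length : Int) - 1 - 1 + 2 - 1) / 2).toNat else 0) = (fs.length - 1) / 2 := by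
    split_ifs with h <;> omega
  rw [PySem.List.pyRange_of_pos _ _ (by norm_num : (0:Int) < 2), hn]
  simp only [List.map_map]
  refine Eq.trans ?_ (pvStride_eq fs).1
  apply List.map_congr_left
  intro k _
  have hcast : (1 : Int) + 2 * (k : Int) = ((2 * k + 1 : Nat) : Int) := by push_cast; ring
  simp only [Function.comp_apply, hcast, PySem.List.pyGetD_natCast]

theorem pvB_eq (html : String) :
    get_stud_list_alt html = pvPick true ((pvSplitSemi html.toList).map String.ofList) := by
  have hfields : (PySem.Str.split? html ";").getD []
      = (pvSplitSemi html.toList).map String.ofList := by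
    simp [PySem.Str.split?, PySem.Chars.split?, pvSplitOn_semi]
  have hne : (pvSplitSemi html.toList).map String.ofList ≠ [] := by
    intro h
    exact pvSplitSemi_ne_nil html.toList (List.map_eq_nil_iff.mp h)
  simp only [get_stud_list_alt, hfields]
  exact pvB_aux _ hne

-- ===== VERDICT (by name: the statement is the Claim_ definition above) =====
theorem get_stud_list_spec : Claim_equal_get_stud_list := by
  intro html _
  unfold Spec_get_stud_list
  rw [pvA_eq, pvB_eq]
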